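-- pv_equiv track=rewrite | github.com/Leonardo0294/Python-Integration-Assignments | ejercicio2.py | girl_or_boy
-- ===== SOURCE A (Python) =====
-- def girl_or_boy(nombre_usuario):
--
--     # Validaciones
--     if type(nombre_usuario) != str:
--         raise TypeError("El parametro recibido no es una cadena")
--
--     if len(nombre_usuario) == 0:
--         raise ValueError("El parametro recibido es una cadena vacia")
--
--     if nombre_usuario != nombre_usuario.lower():
--         raise ValueError("El parametro recibido debe ser una cadena que contenga solo minusculas")
--
--     try:
--         chars = []
--
--         # Se guarda cada caracter en una lista, cada uno solamente una vez
--         for i in nombre_usuario: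
--             if i not in chars:
--                 chars.append(i)
--
--         # Si es par, es una mujer, si es impar, es un hombre
--         if len(chars) % 2 == 0:
--             return "¡ITS A GIRL!"
--         else:
--             return "¡ITS A BOY!"
--     except Exception as e:
--         return e
-- ===== SOURCE B (Python) =====
-- def girl_or_boy(nombre_usuario):
--     # Validaciones (same as the original)
--     if type(nombre_usuario) != str:
--         raise TypeError("El parametro recibido no es una cadena")
--     if len(nombre_usuario) == 0:
--         raise ValueError("El parametro recibido es una cadena vacia")
--     if nombre_usuario != nombre_usuario.lower():
--         raise ValueError("El parametro recibido debe ser una cadena que contenga solo minusculas")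
--
--     # Sort the characters; the number of distinct characters is 1 plus the
--     # number of adjacent unequal pairs in the sorted sequence.
--     ordered = sorted(nombre_usuario)
--     count = 1 + sum(a != b for a, b in zip(ordered, ordered[1:]))
--     return "¡ITS A GIRL!" if count % 2 == 0 else "¡ITS A BOY!"
-- ===== Notes on version B (the rewrite author's own statement) =====
-- stated objective: alternative
-- what changed: Replaces the membership-scanning accumulation of distinct characters with a sort-then-single-pass count of adjacent unequal pairs in the sorted character list.
import Mathlib
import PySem

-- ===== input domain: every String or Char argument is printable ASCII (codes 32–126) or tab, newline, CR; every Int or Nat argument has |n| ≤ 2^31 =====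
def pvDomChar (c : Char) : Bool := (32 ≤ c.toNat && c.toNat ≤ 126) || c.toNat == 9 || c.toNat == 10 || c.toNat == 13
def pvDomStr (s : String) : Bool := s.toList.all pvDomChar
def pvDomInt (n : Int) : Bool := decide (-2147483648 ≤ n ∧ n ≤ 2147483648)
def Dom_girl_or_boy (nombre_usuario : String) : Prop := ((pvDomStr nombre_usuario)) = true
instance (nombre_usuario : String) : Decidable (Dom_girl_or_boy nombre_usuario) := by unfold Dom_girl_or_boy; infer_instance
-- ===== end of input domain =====

-- B counts distinct characters by sorting and counting adjacent unequal pairs instead of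
-- scanning a membership list; same validations and return strings (objective: alternative).

-- ===== PORT A =====
def girl_or_boy (nombre_usuario : String) : String :=
  if nombre_usuario.toList.length = 0 then ""  -- ValueError: excluded by Pre_
  else if ¬ (nombre_usuario.toList = PySem.Chars.lower nombre_usuario.toList) then ""  -- ValueError: excluded by Pre_
  else
    let chars := nombre_usuario.toList.foldl (fun acc i => if i ∈ acc then acc else acc ++ [i]) []
    if chars.length % 2 = 0 then "¡ITS A GIRL!" else "¡ITS A BOY!"

-- ===== PORT B =====
def girl_or_boy_alt (nombre_usuario : String) : String :=
  if nombre_usuario.toList.length = 0 then ""  -- ValueError: excluded by Pre_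
  else if ¬ (nombre_usuario.toList = PySem.Chars.lower nombre_usuario.toList) then ""  -- ValueError: excluded by Pre_
  else
    let ordered := PySem.List.sorted nombre_usuario.toList (fun c => c) false
    let count := 1 + (ordered.zip ordered.tail).countP (fun p => decide (p.1 ≠ p.2))
    if count % 2 = 0 then "¡ITS A GIRL!" else "¡ITS A BOY!"

-- ===== PRECONDITION & SPEC =====
-- A raises ValueError on the empty string and on strings not equal to their lower(); Pre_ excludes exactly those.
def Pre_girl_or_boy (nombre_usuario : String) : Prop :=
  nombre_usuario.toList ≠ [] ∧ nombre_usuario.toList = PySem.Chars.lower nombre_usuario.toList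
instance (nombre_usuario : String) : Decidable (Pre_girl_or_boy nombre_usuario) := by unfold Pre_girl_or_boy; infer_instance
def pvWitness_girl_or_boy : String := "anna"

def Spec_girl_or_boy (nombre_usuario : String) (out : String) : Prop := out = girl_or_boy_alt nombre_usuario
instance (nombre_usuario : String) (out : String) : Decidable (Spec_girl_or_boy nombre_usuario out) := by unfold Spec_girl_or_boy; infer_instance

-- ===== CLAIM (what is proved, stated in full; the proofs are below) =====
def Claim_equal_girl_or_boy : Prop := ∀ (nombre_usuario : String), Dom_girl_or_boy nombre_usuario → Pre_girl_or_boy nombre_usuario → Spec_girl_or_boy nombre_usuario (girl_or_boy nombre_usuario)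

-- ===== LEMMAS AND PROOFS =====

-- A's accumulated distinct list has as many elements as the finset of characters.
lemma foldl_distinct (l : List Char) : ∀ acc : List Char, acc.Nodup →
    (l.foldl (fun acc i => if i ∈ acc then acc else acc ++ [i]) acc).Nodup ∧
    (l.foldl (fun acc i => if i ∈ acc then acc else acc ++ [i]) acc).toFinset
      = acc.toFinset ∪ l.toFinset := by
  induction l with
  | nil => intro acc h; simpa using h
  | cons x xs ih =>
    intro acc hnd
    simp only [List.foldl_cons]
    by_cases hx : x ∈ acc
    · rw [if_pos hx]
      obtain ⟨h1, h2⟩ := ih acc hnd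
      refine ⟨h1, ?_⟩
      rw [h2]
      ext y
      simp only [Finset.mem_union, List.mem_toFinset, List.toFinset_cons, Finset.mem_insert]
      constructor
      · tauto
      · rintro (h | (rfl | h)) <;> [tauto; exact Or.inl hx; tauto]
    · rw [if_neg hx]
      obtain ⟨h1, h2⟩ := ih (acc ++ [x]) (hnd.append (List.nodup_singleton x) (List.disjoint_singleton.mpr hx))
      refine ⟨h1, ?_⟩
      rw [h2]
      ext y
      simp only [Finset.mem_union, List.mem_toFinset, List.mem_append, List.mem_singleton,
        List.toFinset_cons, Finset.mem_insert]
      tauto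

lemma distinct_length (l : List Char) :
    (l.foldl (fun acc i => if i ∈ acc then acc else acc ++ [i]) []).length = l.toFinset.card := by
  obtain ⟨h1, h2⟩ := foldl_distinct l [] List.nodup_nil
  rw [← List.toFinset_card_of_nodup h1, h2]
  simp

-- In a (≤)-sorted nonempty list, 1 + (number of adjacent unequal pairs) is the number of distinct elements.
lemma runs_card : ∀ (s : List Char) (c : Char), (c::s).Pairwise (· ≤ ·) →
    1 + ((c::s).zip s).countP (fun p => decide (p.1 ≠ p.2)) = (c::s).toFinset.card := by
  intro s
  induction s with
  | nil => intro c _; simp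
  | cons d t ih =>
    intro c hp
    have hp' : (d::t).Pairwise (· ≤ ·) := hp.tail
    have hih := ih d hp'
    simp only [List.zip_cons_cons, List.countP_cons, List.toFinset_cons]
    by_cases h : c = d
    · subst h
      simp only [ne_eq, not_true_eq_false, decide_false, Bool.false_eq_true, if_false,
        Nat.add_zero, Finset.insert_idem]
      simp only [ne_eq, List.toFinset_cons] at hih
      omega
    · have hcle : ∀ x ∈ d :: t, c ≤ x := fun x hx => (List.pairwise_cons.mp hp).1 x hx
      have hdle : ∀ x ∈ t, d ≤ x := fun x hx => (List.pairwise_cons.mp hp').1 x hx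
      have hnot : c ∉ (d :: t) := by
        intro hc
        rcases List.mem_cons.mp hc with h1 | h2
        · exact h h1
        · exact h (le_antisymm (hcle d (by simp)) (hdle c h2))
      rw [Finset.card_insert_of_notMem (by simpa using hnot)]
      simp only [ne_eq, h, not_false_eq_true, decide_true, if_true]
      simp only [ne_eq, List.toFinset_cons] at hih
      omega

-- ===== VERDICT (by name: the statement is the Claim_ definition above) =====
theorem girl_or_boy_spec : Claim_equal_girl_or_boy := by
  intro s _ hpre
  obtain ⟨h1, h2⟩ := hpre
  unfold Spec_girl_or_boy girl_or_boy girl_or_boy_alt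
  have hl0 : ¬ (s.toList.length = 0) := by simpa [List.length_eq_zero_iff] using h1
  obtain ⟨c, t, hct⟩ : ∃ c t, PySem.List.sorted s.toList (fun c => c) false = c :: t := by
    rcases hs : PySem.List.sorted s.toList (fun c => c) false with _ | ⟨c, t⟩
    · exact absurd ((PySem.List.sorted_eq_nil_iff _ _ _).mp hs) h1
    · exact ⟨c, t, rfl⟩
  have hpair : (c :: t).Pairwise (· ≤ ·) := by
    have := PySem.List.sorted_pairwise (xs := s.toList) (key := fun c => c)
    rw [hct] at this
    simpa using this
  have hperm : (PySem.List.sorted s.toList (fun c => c) false).Perm s.toList :=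
    PySem.List.sorted_perm _ _ _
  have hfin : (c :: t).toFinset = s.toList.toFinset := by
    ext y
    rw [← hct]
    simp [List.mem_toFinset, hperm.mem_iff]
  have hkey :
      (s.toList.foldl (fun acc i => if i ∈ acc then acc else acc ++ [i]) []).length
        = 1 + ((PySem.List.sorted s.toList (fun c => c) false).zip
            (PySem.List.sorted s.toList (fun c => c) false).tail).countP (fun p => decide (p.1 ≠ p.2)) := by
    rw [hct]
    show _ = 1 + ((c :: t).zip t).countP (fun p => decide (p.1 ≠ p.2))
    rw [distinct_length, runs_card t c hpair, hfin]
  simp only [eq_false hl0, eq_false (not_not_intro h2), if_false, hkey]
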